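-- pv_equiv track=rewrite | github.com/GeneHCT/gcg-ai | scrape_cards_official.py | fix_effect_array
-- ===== SOURCE A (Python) =====
-- from typing import Dict, List, Any, Optional
--
-- def fix_effect_array(effects: List[str]) -> List[str]:
--     """
--     Fix effect array by combining parenthetical explanations with previous elements.
--
--     Rules:
--     1. If an element starts with '(', combine it with the previous element
--     2. Handles spacing correctly whether previous ends with '.' or not
--
--     Args:
--         effects: List of effect strings
--
--     Returns:
--         Fixed list of effect strings with parenthetical explanations combined
--     """
--     if not effects or len(effects) <= 1:
--         return effects
--
--     fixed = []
--     i = 0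
--
--     while i < len(effects):
--         current = effects[i].strip()
--
--         # If this element starts with '(', combine it with the previous element
--         if current.startswith('(') and fixed:
--             # Get the last element we added
--             previous = fixed[-1]
--
--             # Combine with space separator
--             if previous.endswith('.'):
--                 # Period already has space semantics, add the parenthetical
--                 fixed[-1] = f"{previous} {current}"
--             else:
--                 # No period, add space before parenthetical
--                 fixed[-1] = f"{previous} {current}"
--         else:
--             # Normal element, add it
--             fixed.append(current)
--
--         i += 1
--
--     return fixed
-- ===== SOURCE B (Python) =====
-- def fix_effect_array(effects):
--     """
--     Fix effect array by combining parenthetical explanations with previous elements.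
--     Right-to-left pass: walk the tail back-to-front keeping a 'pending' suffix of
--     already-joined parentheticals; a non-parenthetical element emits a group
--     (itself plus pending); the first element always emits a group; then reverse.
--     """
--     if not effects or len(effects) <= 1:
--         return effects
--     groups = []
--     pending = ""
--     for e in reversed(effects[1:]):
--         c = e.strip()
--         if c.startswith('('):
--             pending = c if not pending else c + " " + pending
--         else:
--             groups.append(c if not pending else c + " " + pending)
--             pending = ""
--     c0 = effects[0].strip()
--     groups.append(c0 if not pending else c0 + " " + pending)
--     groups.reverse()
--     return groups
-- ===== Notes on version B (the rewrite author's own statement) =====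
-- stated objective: alternative
-- what changed: Replaces A's forward iteration that mutates the last emitted element with a backward (right-to-left) pass that threads a 'pending' buffer of already-joined parentheticals, emits each merged group exactly once, and reverses at the end.
import Mathlib
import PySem

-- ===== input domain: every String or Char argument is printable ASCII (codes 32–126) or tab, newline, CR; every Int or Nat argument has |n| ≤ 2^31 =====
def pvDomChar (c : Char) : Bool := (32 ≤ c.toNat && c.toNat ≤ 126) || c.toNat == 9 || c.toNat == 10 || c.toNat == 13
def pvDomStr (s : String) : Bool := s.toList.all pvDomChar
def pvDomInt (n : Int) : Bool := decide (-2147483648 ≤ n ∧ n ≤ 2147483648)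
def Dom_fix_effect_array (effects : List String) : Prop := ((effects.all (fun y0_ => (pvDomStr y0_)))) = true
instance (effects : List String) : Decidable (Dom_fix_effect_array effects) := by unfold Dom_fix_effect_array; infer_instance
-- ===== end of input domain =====

-- B replaces A's forward loop that rewrites its last emitted element by a
-- right-to-left recursion threading a pending buffer of joined parentheticals
-- and emitting each merged group once; same cost (alternative).


-- ===== PORT A =====
-- one step of A's while-loop: strip, then either rewrite fixed[-1] or append
-- (current = effects[i].strip(), previous = fixed[-1] are inlined)
def pvStepA (fixed : List String) (e : String) : List String :=
  if PySem.Str.startswith (PySem.Str.strip e) "(" = true ∧ fixed ≠ [] then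
    if PySem.Str.endswith fixed.getLast! "." = true then
      fixed.dropLast ++ [fixed.getLast! ++ " " ++ PySem.Str.strip e]
    else
      fixed.dropLast ++ [fixed.getLast! ++ " " ++ PySem.Str.strip e]
  else
    fixed ++ [PySem.Str.strip e]

def fix_effect_array (effects : List String) : List String :=
  if effects = [] ∨ effects.length ≤ 1 then effects
  else effects.foldl pvStepA []

-- ===== PORT B =====
-- `c if not pending else c + " " + pending`
def pvJoinPend (c p : String) : String := if p = "" then c else c ++ " " ++ p

-- one step of Source B's backward loop over reversed(effects[1:]): state (groups, pending)
def pvStepB (st : List String × String) (e : String) : List String × String :=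
  let c := PySem.Str.strip e
  if PySem.Str.startswith c "(" = true then (st.1, pvJoinPend c st.2)
  else (st.1 ++ [pvJoinPend c st.2], "")

def fix_effect_array_alt (effects : List String) : List String :=
  if effects = [] ∨ effects.length ≤ 1 then effects
  else
    match effects with
    | [] => []
    | e0 :: rest =>
      let st := rest.reverse.foldl pvStepB ([], "")
      (st.1 ++ [pvJoinPend (PySem.Str.strip e0) st.2]).reverse

-- ===== PRECONDITION & SPEC =====
def Spec_fix_effect_array (effects : List String) (out : List String) : Prop := out = fix_effect_array_alt effects
instance (effects : List String) (out : List String) : Decidable (Spec_fix_effect_array effects out) := by unfold Spec_fix_effect_array; infer_instance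

-- ===== CLAIM (what is proved, stated in full; the proofs are below) =====
def Claim_equal_fix_effect_array : Prop := ∀ (effects : List String), Dom_fix_effect_array effects → Spec_fix_effect_array effects (fix_effect_array effects)

-- ===== LEMMAS AND PROOFS =====

-- proof-side recursive reading of B's backward loop: (groups in order, pending)
def pvGoB : List String → List String × String
  | [] => ([], "")
  | e :: l =>
    let (gs, p) := pvGoB l
    let c := PySem.Str.strip e
    if PySem.Str.startswith c "(" = true then (gs, pvJoinPend c p)
    else (pvJoinPend c p :: gs, "")

-- B's foldl over the reversed tail computes pvGoB with the groups reversed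
theorem pvFoldRev (rest : List String) :
    rest.reverse.foldl pvStepB ([], "") = ((pvGoB rest).1.reverse, (pvGoB rest).2) := by
  induction rest with
  | nil => rfl
  | cons e l ih =>
    simp only [List.reverse_cons, List.foldl_append, List.foldl_cons, List.foldl_nil, ih,
      pvGoB, pvStepB]
    split <;> simp

theorem pvGetLast!_concat {a : Type} [Inhabited a] (q : List a) (g : a) :
    (q ++ [g]).getLast! = g := by
  rw [List.getLast!_eq_getLast?_getD, List.getLast?_concat]; rfl

-- a string starting with '(' is nonempty
theorem pvStarts_ne (c : String) (h : PySem.Str.startswith c "(" = true) : c ≠ "" := by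
  intro hc; subst hc; exact absurd h (by decide)

-- a concatenation through " " is nonempty
theorem pvCat_ne (x p : String) : x ++ " " ++ p ≠ "" := by
  intro h
  have := congrArg String.toList h
  simp [String.toList_append] at this

-- pending composition: appending to the last element commutes with pvJoinPend
theorem pvJoinPend_assoc (x c p : String) (hc : c ≠ "") :
    pvJoinPend (x ++ " " ++ c) p = pvJoinPend x (pvJoinPend c p) := by
  unfold pvJoinPend
  by_cases hp : p = ""
  · simp [hp, hc]
  · simp only [hp, if_false, if_neg (pvCat_ne c p)]
    simp [String.append_assoc]

-- dropLast ++ [getLast!] recovers a nonempty list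
theorem pvDropLast_getLast (q : List String) (hq : q ≠ []) :
    q.dropLast ++ [q.getLast!] = q := by
  obtain ⟨l, g, rfl⟩ := (List.eq_nil_or_concat q).resolve_left hq
  simp

-- main invariant: A's remaining fold over a nonempty accumulator equals the
-- accumulator with B's pending merged into its last element, then B's groups
theorem pvFold_go (rest : List String) :
    ∀ fixed : List String, fixed ≠ [] →
    rest.foldl pvStepA fixed
      = fixed.dropLast ++ [pvJoinPend fixed.getLast! (pvGoB rest).2] ++ (pvGoB rest).1 := by
  induction rest with
  | nil =>
    intro fixed hf
    simp only [pvGoB, pvJoinPend, if_true, List.foldl_nil, List.append_nil]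
    rw [pvDropLast_getLast fixed hf]
  | cons e l ih =>
    intro fixed hf
    simp only [List.foldl_cons, pvGoB]
    by_cases hs : PySem.Str.startswith (PySem.Str.strip e) "(" = true
    · have hstep : pvStepA fixed e
          = fixed.dropLast ++ [fixed.getLast! ++ " " ++ PySem.Str.strip e] := by
        unfold pvStepA
        rw [if_pos ⟨hs, hf⟩, ite_self]
      rw [hstep, ih _ (by simp)]
      simp only [hs, if_pos, List.dropLast_concat, pvGetLast!_concat]
      rw [pvJoinPend_assoc _ _ _ (pvStarts_ne _ hs)]
    · have hstep : pvStepA fixed e = fixed ++ [PySem.Str.strip e] := by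
        unfold pvStepA
        rw [if_neg (fun h => hs h.1)]
      rw [hstep, ih _ (by simp)]
      simp only [hs, Bool.false_eq_true, if_false]
      rw [List.dropLast_concat, pvGetLast!_concat]
      have : fixed.dropLast ++ [pvJoinPend fixed.getLast! ""] ++ _ = _ :=
        congrArg (· ++ (pvJoinPend (PySem.Str.strip e) (pvGoB l).2 :: (pvGoB l).1))
          (by rw [show pvJoinPend fixed.getLast! "" = fixed.getLast! from rfl,
                  pvDropLast_getLast fixed hf])
      simp only [List.append_assoc] at this ⊢
      rw [this]
      simp

-- ===== VERDICT (by name: the statement is the Claim_ definition above) =====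
theorem fix_effect_array_spec : Claim_equal_fix_effect_array := by
  intro effects _
  unfold Spec_fix_effect_array fix_effect_array fix_effect_array_alt
  split
  · rfl
  · match effects with
    | [] => rfl
    | e0 :: rest =>
      have h0 : pvStepA [] e0 = [PySem.Str.strip e0] := by
        unfold pvStepA
        rw [if_neg (fun h => h.2 rfl)]
        rfl
      simp only [List.foldl_cons, h0, pvFoldRev]
      rw [pvFold_go rest [PySem.Str.strip e0] (by simp)]
      simp
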